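-- pv_equiv track=rewrite | github.com/jolitti/adventofcode | 18/old/pairstr.py | needsExploding
-- ===== SOURCE A (Python) =====
-- def needsExploding(p:str) -> bool:
--     nest = 0
--     for x in p:
--         match x:
--             case "[": nest += 1
--             case "]": nest -= 1
--         if nest>=4: return True
--     return False
-- ===== SOURCE B (Python) =====
-- def needsExploding(p: str) -> bool:
--     # Divide and conquer: go(s) = (total bracket delta of s,
--     # max over all prefixes of s (including the empty one) of their bracket balance).
--     def go(s):
--         if len(s) <= 1:
--             d = 1 if s == "[" else -1 if s == "]" else 0
--             return d, max(0, d)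
--         m = len(s) // 2
--         t1, b1 = go(s[:m])
--         t2, b2 = go(s[m:])
--         return t1 + t2, max(b1, t1 + b2)
--     return go(p)[1] >= 4
-- ===== Notes on version B (the rewrite author's own statement) =====
-- stated objective: alternative
-- what changed: Replaces the stateful left-to-right early-exit scan by a divide-and-conquer recursion that splits the string in half, computes (total bracket delta, max prefix depth) of each half, and combines them with max(b1, t1 + b2).
import Mathlib
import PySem

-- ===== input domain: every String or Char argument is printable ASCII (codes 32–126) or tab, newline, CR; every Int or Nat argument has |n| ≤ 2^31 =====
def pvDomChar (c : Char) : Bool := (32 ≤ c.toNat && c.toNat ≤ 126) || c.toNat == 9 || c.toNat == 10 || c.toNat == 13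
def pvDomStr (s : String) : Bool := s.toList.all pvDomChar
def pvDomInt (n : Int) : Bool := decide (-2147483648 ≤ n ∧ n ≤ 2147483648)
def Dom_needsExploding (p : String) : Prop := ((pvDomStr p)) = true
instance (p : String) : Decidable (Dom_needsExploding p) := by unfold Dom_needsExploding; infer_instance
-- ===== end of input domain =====

-- B replaces A's stateful early-exit scan by a divide-and-conquer recursion on string halves
-- computing (total bracket delta, max prefix depth); same O(n) cost, alternative algorithm.

-- ===== PORT A =====
def pvALoop : List Char → Int → Bool
  | [], _ => false
  | x :: xs, nest =>
    let n : Int := match x with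
      | '[' => nest + 1
      | ']' => nest - 1
      | _ => nest
    if n ≥ 4 then true else pvALoop xs n

def needsExploding (p : String) : Bool := pvALoop p.toList 0

-- ===== PORT B =====
-- go(s): (total bracket delta, max prefix balance including empty prefix)
def pvGo (s : List Char) : Int × Int :=
  if h : s.length ≤ 1 then
    let d : Int := if s = ['['] then 1 else if s = [']'] then -1 else 0
    (d, max 0 d)
  else
    let m := s.length / 2
    let r1 := pvGo (s.take m)
    let r2 := pvGo (s.drop m)
    (r1.1 + r2.1, max r1.2 (r1.1 + r2.2))
termination_by s.length
decreasing_by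
  · simp only [List.length_take]; omega
  · simp only [List.length_drop]; omega

def needsExploding_alt (p : String) : Bool := decide ((pvGo p.toList).2 ≥ 4)

-- ===== PRECONDITION & SPEC =====
def Spec_needsExploding (p : String) (out : Bool) : Prop := out = needsExploding_alt p
instance (p : String) (out : Bool) : Decidable (Spec_needsExploding p out) := by unfold Spec_needsExploding; infer_instance

-- ===== CLAIM (what is proved, stated in full; the proofs are below) =====
def Claim_equal_needsExploding : Prop := ∀ (p : String), Dom_needsExploding p → Spec_needsExploding p (needsExploding p)

-- ===== LEMMAS AND PROOFS =====

-- reference semantics: delta of one char, total delta, max prefix balance (incl. empty prefix)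
def pvD (c : Char) : Int := if c = '[' then 1 else if c = ']' then -1 else 0

def pvTot : List Char → Int
  | [] => 0
  | c :: cs => pvD c + pvTot cs

def pvMp : List Char → Int
  | [] => 0
  | c :: cs => max 0 (pvD c + pvMp cs)

theorem pvMp_nonneg (s : List Char) : 0 ≤ pvMp s := by
  cases s <;> simp [pvMp]

theorem pvTot_append (xs ys : List Char) : pvTot (xs ++ ys) = pvTot xs + pvTot ys := by
  induction xs with
  | nil => simp [pvTot]
  | cons x xs ih => simp [pvTot, ih]; ring

theorem pvMp_append (xs ys : List Char) :
    pvMp (xs ++ ys) = max (pvMp xs) (pvTot xs + pvMp ys) := by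
  induction xs with
  | nil =>
    have := pvMp_nonneg ys
    simp [pvMp, pvTot]; omega
  | cons x xs ih =>
    simp only [List.cons_append, pvMp, pvTot, ih]
    omega

theorem pvGo_eq (s : List Char) : pvGo s = (pvTot s, pvMp s) := by
  induction s using pvGo.induct with
  | case1 s h =>
    rw [pvGo]; simp only [dif_pos h]
    match s, h with
    | [], _ => decide
    | [c], _ =>
      by_cases h1 : c = '['
      · subst h1; decide
      · by_cases h2 : c = ']'
        · subst h2; decide
        · simp [pvTot, pvMp, pvD, h1, h2]
  | case2 s h m ih1 ih2 =>
    rw [pvGo]; simp only [dif_neg h]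
    have hsplit : s.take (s.length / 2) ++ s.drop (s.length / 2) = s := List.take_append_drop _ _
    rw [ih1, ih2]
    simp only [Prod.mk.injEq]
    constructor
    · rw [← pvTot_append, hsplit]
    · rw [← pvMp_append, hsplit]

theorem pvALoop_eq (xs : List Char) (nest : Int) (h : nest < 4) :
    pvALoop xs nest = decide (4 ≤ nest + pvMp xs) := by
  induction xs generalizing nest with
  | nil => simp [pvALoop, pvMp]; omega
  | cons x xs ih =>
    have hmatch : (match x with
        | '[' => nest + 1
        | ']' => nest - 1
        | _ => nest) = nest + pvD x := by
      by_cases h1 : x = '['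
      · subst h1; simp [pvD]
      · by_cases h2 : x = ']'
        · subst h2; simp [pvD]; omega
        · simp only [pvD, if_neg h1, if_neg h2]; omega
    simp only [pvALoop, hmatch, pvMp]
    by_cases h4 : 4 ≤ nest + pvD x
    · have hn := pvMp_nonneg xs
      rw [if_pos (by omega : nest + pvD x ≥ 4)]
      have : (4 : Int) ≤ nest + max 0 (pvD x + pvMp xs) := by omega
      simp [this]
    · rw [if_neg (by omega : ¬ nest + pvD x ≥ 4), ih _ (by omega)]
      have : (4 ≤ nest + pvD x + pvMp xs) ↔ (4 ≤ nest + max 0 (pvD x + pvMp xs)) := by omega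
      simp only [decide_eq_decide]
      omega

-- ===== VERDICT (by name: the statement is the Claim_ definition above) =====
theorem needsExploding_spec : Claim_equal_needsExploding := by
  intro p _
  unfold Spec_needsExploding needsExploding needsExploding_alt
  rw [pvALoop_eq _ 0 (by omega), pvGo_eq]
  simp
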